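-- pv_equiv track=rewrite | github.com/boulahya01/ai-content-detector-v1.1 | backend/app/models/analyzer.py | _check_repetitive_patterns
-- ===== SOURCE A (Python) =====
-- from typing import Dict, List, Optional, Any
--
-- def _check_repetitive_patterns(text: str) -> Dict:
--     """Check for repetitive patterns in text."""
--     words = text.split()
--     bigrams = list(zip(words, words[1:]))
--     bigram_freq = {}
--     for bg in bigrams:
--         bigram_freq[bg] = bigram_freq.get(bg, 0) + 1
--
--     return {
--         "repeatedPhrases": len([k for k, v in bigram_freq.items() if v > 1]),
--         "maxRepetition": max(bigram_freq.values()) if bigram_freq else 0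
--     }
-- ===== SOURCE B (Python) =====
-- def _check_repetitive_patterns(text: str) -> dict:
--     """Check for repetitive patterns in text (sorted-run scan, no frequency dict)."""
--     words = text.split()
--     bigrams = sorted(zip(words, words[1:]))
--     repeated = 0
--     mx = 0
--     prev = None
--     run = 0
--     for bg in bigrams:
--         if bg == prev:
--             run += 1
--         else:
--             if run > 1:
--                 repeated += 1
--             if mx < run:
--                 mx = run
--             prev = bg
--             run = 1
--     if run > 1:
--         repeated += 1
--     if mx < run:
--         mx = run
--     return {"repeatedPhrases": repeated, "maxRepetition": mx}
-- ===== Notes on version B (the rewrite author's own statement) =====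
-- stated objective: alternative
-- what changed: Replaces the frequency dictionary plus post-pass (filter items, max over values) with a sort of the bigram list followed by a single run-length scan that counts repeated runs and tracks the longest run on the fly.
import Mathlib
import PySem

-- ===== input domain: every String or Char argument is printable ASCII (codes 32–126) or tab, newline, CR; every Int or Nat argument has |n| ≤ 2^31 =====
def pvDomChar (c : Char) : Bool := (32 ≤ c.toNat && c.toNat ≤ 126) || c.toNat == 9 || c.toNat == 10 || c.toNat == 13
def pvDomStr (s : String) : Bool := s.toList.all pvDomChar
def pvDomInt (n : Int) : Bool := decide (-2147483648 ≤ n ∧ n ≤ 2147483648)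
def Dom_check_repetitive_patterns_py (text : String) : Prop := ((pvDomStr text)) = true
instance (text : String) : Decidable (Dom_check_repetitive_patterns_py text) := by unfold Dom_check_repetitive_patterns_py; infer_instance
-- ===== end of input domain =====

-- B replaces A's frequency dictionary and its two post-passes by sorting the bigram list and
-- counting/maximising run lengths in one scan (alternative algorithm; return value only).

-- ===== PORT A =====
def check_repetitive_patterns_py (text : String) : List (String × Int) :=
  let words := PySem.Str.split₀ text
  let bigrams := words.zip (PySem.List.slice words (some 1) none)
  let bigram_freq : PySem.Dict (String × String) Int :=
    bigrams.foldl (fun d bg => d.insert bg (d.getD bg 0 + 1)) PySem.Dict.empty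
  [("repeatedPhrases", ((bigram_freq.items.filter (fun kv => decide (1 < kv.2))).length : Int)),
   ("maxRepetition", if !bigram_freq.items.isEmpty
                     then (PySem.List.max? bigram_freq.values (fun v => v)).getD 0
                     else 0)]

-- ===== PORT B =====
-- the body of B's for-loop (state: prev, run, repeated, mx)
def pvAltStep : (Option (String × String) × Int × Int × Int) → (String × String) →
    (Option (String × String) × Int × Int × Int)
  | (prev, run, repeated, mx), bg =>
    if some bg == prev then (prev, run + 1, repeated, mx)
    else (some bg, 1, if 1 < run then repeated + 1 else repeated, if mx < run then run else mx)

def check_repetitive_patterns_py_alt (text : String) : List (String × Int) :=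
  let words := PySem.Str.split₀ text
  let bigrams := PySem.List.sorted2 (words.zip (PySem.List.slice words (some 1) none)) Prod.fst Prod.snd
  let st := bigrams.foldl pvAltStep (none, 0, 0, 0)
  let repeated := if 1 < st.2.1 then st.2.2.1 + 1 else st.2.2.1
  let mx := if st.2.2.2 < st.2.1 then st.2.1 else st.2.2.2
  [("repeatedPhrases", repeated), ("maxRepetition", mx)]

-- ===== PRECONDITION & SPEC =====
def Spec_check_repetitive_patterns_py (text : String) (out : List (String × Int)) : Prop := out = check_repetitive_patterns_py_alt text
instance (text : String) (out : List (String × Int)) : Decidable (Spec_check_repetitive_patterns_py text out) := by unfold Spec_check_repetitive_patterns_py; infer_instance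

-- ===== CLAIM (what is proved, stated in full; the proofs are below) =====
def Claim_equal_check_repetitive_patterns_py : Prop := ∀ (text : String), Dom_check_repetitive_patterns_py text → Spec_check_repetitive_patterns_py text (check_repetitive_patterns_py text)

-- ===== LEMMAS AND PROOFS =====

-- canonical quantities both ports are reduced to: number of distinct bigrams occurring
-- more than once, and the maximal multiplicity (0 on the empty list)
def pvCanRep (L : List (String × String)) : Int :=
  (((PySem.Set.ofList L).filter (fun k => decide (1 < L.count k))).length : Int)
def pvCanMx (L : List (String × String)) : Int :=
  ((PySem.Set.ofList L).map (fun k => (L.count k : Int))).foldl max 0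

theorem pv_ifmax (a b : Int) : (if a < b then b else a) = max a b := by
  omega

theorem pv_foldl_max_init (l : List Int) (a b : Int) :
    l.foldl max (max a b) = max a (l.foldl max b) := by
  induction l generalizing b with
  | nil => rfl
  | cons x t ih => simpa [List.foldl_cons, max_assoc] using ih (max b x)

theorem pv_canMx_nonneg (L : List (String × String)) : 0 ≤ pvCanMx L :=
  (PySem.List.le_foldl_max _ 0).1

-- sorted2 with fst/snd keys is the insertBy fold for the lexicographic key
theorem pv_before_eq (a b : String × String) :
    (decide (a.1 < b.1) || (!decide (b.1 < a.1) && decide (a.2 < b.2))) =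
      decide ((toLex a : Lex (String × String)) < toLex b) := by
  by_cases h1 : a.1 < b.1
  · simp [h1, Prod.Lex.lt_iff]
  · by_cases h2 : b.1 < a.1
    · simp [h1, h2, Prod.Lex.lt_iff, h2.ne']
    · have he : a.1 = b.1 := le_antisymm (not_lt.mp h2) (not_lt.mp h1)
      simp [Prod.Lex.lt_iff, he]

theorem pv_sorted2_eq (L : List (String × String)) :
    PySem.List.sorted2 L Prod.fst Prod.snd false =
      L.foldl (fun acc x => PySem.List.insertBy
        (fun a b => decide ((toLex a : Lex (String × String)) < toLex b)) x acc) [] := by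
  have hb : (fun (a b : String × String) =>
      (decide (a.1 < b.1) || (!decide (b.1 < a.1) && decide (a.2 < b.2)))) =
      (fun a b => decide ((toLex a : Lex (String × String)) < toLex b)) := by
    funext a b; exact pv_before_eq a b
  simp only [PySem.List.sorted2, hb]
  rfl

theorem pv_foldl_insertBy_pairwise (xs acc : List (String × String))
    (h : acc.Pairwise (fun a b => (toLex a : Lex (String × String)) ≤ toLex b)) :
    (xs.foldl (fun acc x => PySem.List.insertBy
        (fun a b => decide ((toLex a : Lex (String × String)) < toLex b)) x acc) acc).Pairwise
      (fun a b => (toLex a : Lex (String × String)) ≤ toLex b) := by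
  induction xs generalizing acc with
  | nil => exact h
  | cons x t ih =>
    exact ih _ (PySem.List.insertBy_pairwise_le (fun p => (toLex p : Lex (String × String))) x acc h)

theorem pv_sorted2_pairwise (L : List (String × String)) :
    (PySem.List.sorted2 L Prod.fst Prod.snd false).Pairwise
      (fun a b => (toLex a : Lex (String × String)) ≤ toLex b) := by
  rw [pv_sorted2_eq]
  exact pv_foldl_insertBy_pairwise L [] (List.Pairwise.nil)

-- run absorption: equal elements extend the current run
theorem pv_absorb (k : Nat) (rest : List (String × String)) (y : String × String)
    (c rep mx : Int) :
    (List.replicate k y ++ rest).foldl pvAltStep (some y, c, rep, mx) =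
      rest.foldl pvAltStep (some y, c + (k : Int), rep, mx) := by
  induction k generalizing c with
  | zero => simp
  | succ m ih =>
    simp only [List.replicate_succ, List.cons_append, List.foldl_cons, pvAltStep,
      BEq.rfl, if_pos]
    rw [ih]
    have : c + 1 + (m : Int) = c + ((m : Nat) + 1 : Nat) := by push_cast; ring
    rw [this]

-- a sorted list whose elements all dominate y decomposes as y-run ++ y-free sorted tail
theorem pv_decomp (T : List (String × String)) (y : String × String)
    (hT : T.Pairwise (fun a b => (toLex a : Lex (String × String)) ≤ toLex b))
    (hy : ∀ z ∈ T, (toLex y : Lex (String × String)) ≤ toLex z) :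
    ∃ T', T = List.replicate (T.count y) y ++ T' ∧ y ∉ T' ∧
      T'.Pairwise (fun a b => (toLex a : Lex (String × String)) ≤ toLex b) ∧
      (∀ z ∈ T', (toLex y : Lex (String × String)) ≤ toLex z) ∧ T'.length ≤ T.length := by
  induction T with
  | nil => exact ⟨[], by simp, by simp, List.Pairwise.nil, by simp, le_rfl⟩
  | cons z T ih =>
    rw [List.pairwise_cons] at hT
    obtain ⟨hzT, hT'⟩ := hT
    have hzy : (toLex y : Lex (String × String)) ≤ toLex z := hy z (by simp)
    have hyT : ∀ w ∈ T, (toLex y : Lex (String × String)) ≤ toLex w :=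
      fun w hw => hy w (List.mem_cons_of_mem _ hw)
    by_cases hz : z = y
    · subst hz
      obtain ⟨T', hTeq, hyn, hp, hge, hlen⟩ := ih hT' hyT
      refine ⟨T', ?_, hyn, hp, hge, by simp; omega⟩
      rw [List.count_cons_self, List.replicate_succ, List.cons_append]
      exact congrArg _ hTeq
    · have hnot : y ∉ z :: T := by
        intro hmem
        rcases List.mem_cons.mp hmem with h | h
        · exact hz h.symm
        · have h1 : (toLex z : Lex (String × String)) ≤ toLex y := by
            have := hzT y h; exact this
          exact hz (toLex.injective (le_antisymm h1 hzy))
      refine ⟨z :: T, ?_, hnot, List.pairwise_cons.mpr ⟨hzT, hT'⟩, hy, le_rfl⟩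
      rw [List.count_eq_zero.mpr hnot, List.replicate_zero, List.nil_append]

theorem pv_ofList_perm (y : String × String) (cnt : Nat) (T' : List (String × String))
    (hy : y ∉ T') :
    (PySem.Set.ofList (y :: (List.replicate cnt y ++ T'))).Perm (y :: PySem.Set.ofList T') := by
  rw [List.perm_ext_iff_of_nodup (PySem.Set.nodup_ofList _)
    (List.nodup_cons.mpr ⟨fun h => hy ((PySem.Set.mem_ofList _ _).mp h), PySem.Set.nodup_ofList _⟩)]
  intro a
  simp only [PySem.Set.mem_ofList, List.mem_cons, List.mem_append, List.mem_replicate]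
  constructor
  · rintro (h | ⟨_, h⟩ | h)
    · exact Or.inl h
    · exact Or.inl h
    · exact Or.inr h
  · rintro (h | h)
    · exact Or.inl h
    · exact Or.inr (Or.inr h)

theorem pv_count_self (y : String × String) (cnt : Nat) (T' : List (String × String))
    (hy : y ∉ T') :
    (y :: (List.replicate cnt y ++ T')).count y = cnt + 1 := by
  rw [List.count_cons_self, List.count_append, List.count_replicate_self,
    List.count_eq_zero.mpr hy]

theorem pv_count_other (y z : String × String) (cnt : Nat) (T' : List (String × String))
    (hz : z ≠ y) :
    (y :: (List.replicate cnt y ++ T')).count z = T'.count z := by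
  simp [List.count_append, List.count_replicate, Ne.symm hz]

theorem pv_canRep_cons (y : String × String) (cnt : Nat) (T' : List (String × String))
    (hy : y ∉ T') :
    pvCanRep (y :: (List.replicate cnt y ++ T')) =
      (if 0 < cnt then 1 else 0) + pvCanRep T' := by
  unfold pvCanRep
  rw [((pv_ofList_perm y cnt T' hy).filter _).length_eq]
  rw [List.filter_cons]
  have hcnt : (y :: (List.replicate cnt y ++ T')).count y = cnt + 1 := pv_count_self y cnt T' hy
  have hcongr : List.filter (fun k => decide (1 < (y :: (List.replicate cnt y ++ T')).count k))
      (PySem.Set.ofList T') = List.filter (fun k => decide (1 < T'.count k)) (PySem.Set.ofList T') := by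
    apply List.filter_congr
    intro x hx
    have hxy : x ≠ y := fun h => hy (h ▸ (PySem.Set.mem_ofList _ _).mp hx)
    rw [pv_count_other y x cnt T' hxy]
  rw [hcongr, hcnt]
  by_cases h : 0 < cnt
  · rw [if_pos h, if_pos (by simpa using by omega : decide (1 < cnt + 1) = true)]
    simp
    omega
  · rw [if_neg h, if_neg (by simp; omega)]
    omega

theorem pv_canMx_cons (y : String × String) (cnt : Nat) (T' : List (String × String))
    (hy : y ∉ T') :
    pvCanMx (y :: (List.replicate cnt y ++ T')) = max (1 + (cnt : Int)) (pvCanMx T') := by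
  unfold pvCanMx
  rw [((pv_ofList_perm y cnt T' hy).map _).foldl_eq]
  rw [List.map_cons, pv_count_self y cnt T' hy]
  have hcongr : (PySem.Set.ofList T').map
      (fun k => (((y :: (List.replicate cnt y ++ T')).count k : Int))) =
      (PySem.Set.ofList T').map (fun k => ((T'.count k : Int))) := by
    apply List.map_congr_left
    intro x hx
    have hxy : x ≠ y := fun h => hy (h ▸ (PySem.Set.mem_ofList _ _).mp hx)
    rw [pv_count_other y x cnt T' hxy]
  rw [hcongr, List.foldl_cons]
  push_cast
  rw [show (max (0:Int) ((cnt : Int) + 1)) = max ((cnt : Int) + 1) 0 from max_comm _ _,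
    pv_foldl_max_init]
  congr 1
  ring

-- main scan lemma: a scan of sorted input starting inside a fresh y-run
theorem pv_main (n : Nat) (T : List (String × String)) (y : String × String)
    (rep mx : Int) (hn : T.length ≤ n)
    (hp : (y :: T).Pairwise (fun a b => (toLex a : Lex (String × String)) ≤ toLex b)) :
    ((if 1 < (T.foldl pvAltStep (some y, 1, rep, mx)).2.1
        then (T.foldl pvAltStep (some y, 1, rep, mx)).2.2.1 + 1
        else (T.foldl pvAltStep (some y, 1, rep, mx)).2.2.1),
     (if (T.foldl pvAltStep (some y, 1, rep, mx)).2.2.2 < (T.foldl pvAltStep (some y, 1, rep, mx)).2.1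
        then (T.foldl pvAltStep (some y, 1, rep, mx)).2.1
        else (T.foldl pvAltStep (some y, 1, rep, mx)).2.2.2)) =
      (rep + pvCanRep (y :: T), max mx (pvCanMx (y :: T))) := by
  induction n generalizing T y rep mx with
  | zero =>
    have hT0 : T = [] := by
      cases T with
      | nil => rfl
      | cons a b => simp at hn
    subst hT0
    have h1 : pvCanRep [y] = 0 := by
      have h := pv_canRep_cons y 0 [] (by simp)
      simp only [List.replicate_zero, List.nil_append] at h
      rw [h]
      simp [pvCanRep]
    have h2 : pvCanMx [y] = 1 := by
      have h := pv_canMx_cons y 0 [] (by simp)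
      simp only [List.replicate_zero, List.nil_append] at h
      rw [h]
      simp [pvCanMx]
    simp only [List.foldl_nil, Prod.mk.injEq, h1, h2]
    refine ⟨by norm_num, ?_⟩
    rw [pv_ifmax]
  | succ n ih =>
    rw [List.pairwise_cons] at hp
    obtain ⟨hyT, hT⟩ := hp
    obtain ⟨T', hTeq, hyn, hp', hge', hlen⟩ := pv_decomp T y hT hyT
    rw [hTeq, pv_absorb]
    have hcr := pv_canRep_cons y (T.count y) T' hyn
    have hcm := pv_canMx_cons y (T.count y) T' hyn
    rw [hcr, hcm]
    cases T' with
    | nil =>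
      simp only [List.foldl_nil, Prod.mk.injEq]
      constructor
      · have h1 : pvCanRep ([] : List (String × String)) = 0 := by simp [pvCanRep]
        rw [h1]
        split_ifs <;> push_cast at * <;> omega
      · have h2 : pvCanMx ([] : List (String × String)) = 0 := by simp [pvCanMx]
        rw [h2, max_eq_left (by positivity : (0:Int) ≤ 1 + (T.count y : Int)), pv_ifmax]
    | cons z U =>
      have hne : ¬ (z = y) := fun h => hyn (h ▸ List.mem_cons_self)
      rw [List.foldl_cons,
        show pvAltStep (some y, 1 + (T.count y : Int), rep, mx) z =
          (some z, 1, if 1 < 1 + (T.count y : Int) then rep + 1 else rep,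
            if mx < 1 + (T.count y : Int) then 1 + (T.count y : Int) else mx) from by
          simp [pvAltStep, hne]]
      have hUlen : U.length ≤ n := by
        have h3 := hlen
        simp only [List.length_cons] at h3
        omega
      rw [ih U z _ _ hUlen hp']
      refine Prod.mk.injEq .. ▸ ⟨?_, ?_⟩
      · split_ifs <;> push_cast at * <;> omega
      · rw [pv_ifmax, max_assoc]

theorem pv_ofList_perm_of_perm {L₁ L₂ : List (String × String)} (h : L₁.Perm L₂) :
    (PySem.Set.ofList L₁).Perm (PySem.Set.ofList L₂) := by
  rw [List.perm_ext_iff_of_nodup (PySem.Set.nodup_ofList _) (PySem.Set.nodup_ofList _)]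
  intro a
  rw [PySem.Set.mem_ofList, PySem.Set.mem_ofList]
  exact h.mem_iff

theorem pv_canRep_perm {L₁ L₂ : List (String × String)} (h : L₁.Perm L₂) :
    pvCanRep L₁ = pvCanRep L₂ := by
  unfold pvCanRep
  rw [List.filter_congr (fun x _ => by rw [h.count_eq x])]
  rw [((pv_ofList_perm_of_perm h).filter _).length_eq]

theorem pv_canMx_perm {L₁ L₂ : List (String × String)} (h : L₁.Perm L₂) :
    pvCanMx L₁ = pvCanMx L₂ := by
  unfold pvCanMx
  rw [List.map_congr_left (fun x _ => by rw [h.count_eq x])]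
  rw [((pv_ofList_perm_of_perm h).map _).foldl_eq]

def pvL (text : String) : List (String × String) :=
  (PySem.Str.split₀ text).zip (PySem.List.slice (PySem.Str.split₀ text) (some 1) none)

theorem pv_A_eq (text : String) :
    check_repetitive_patterns_py text =
      [("repeatedPhrases", pvCanRep (pvL text)), ("maxRepetition", pvCanMx (pvL text))] := by
  unfold check_repetitive_patterns_py
  simp only [letFun]
  rw [show ((PySem.Str.split₀ text).zip (PySem.List.slice (PySem.Str.split₀ text) (some 1) none)) = pvL text from rfl]
  rw [PySem.Dict.foldl_insert_getD_add_one_eq_counter]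
  rw [PySem.Dict.items_counter]
  refine List.cons_eq_cons.mpr ⟨?_, List.cons_eq_cons.mpr ⟨?_, rfl⟩⟩
  · -- repeatedPhrases
    rw [Prod.mk.injEq]
    refine ⟨rfl, ?_⟩
    rw [List.filter_map, List.length_map]
    unfold pvCanRep
    have hf : List.filter ((fun kv : (String × String) × Int => decide (1 < kv.2)) ∘
          fun k => (k, ((pvL text).count k : Int))) (PySem.Set.ofList (pvL text)) =
        List.filter (fun k => decide (1 < (pvL text).count k)) (PySem.Set.ofList (pvL text)) :=
      List.filter_congr (fun x _ => by simp)
    rw [hf]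
  · -- maxRepetition
    rw [Prod.mk.injEq]
    refine ⟨rfl, ?_⟩
    cases hL : pvL text with
    | nil => simp [pvCanMx]
    | cons w R =>
      have hof : PySem.Set.ofList (pvL text) = w :: ((PySem.Set.ofList R).discard w) := by
        rw [hL, PySem.Set.ofList_cons]
      rw [hL] at hof
      simp only [PySem.Dict.values, PySem.Dict.items_counter, hof, List.map_cons, List.map_map,
        List.isEmpty_cons, Bool.not_false, if_true]
      rw [PySem.List.max?_id_cons, Option.getD_some]
      unfold pvCanMx
      rw [hof, List.map_cons, List.foldl_cons,
        max_eq_right (Int.natCast_nonneg _ : (0:Int) ≤ ((w :: R).count w : Int))]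
      rfl

theorem pv_B_eq (text : String) :
    check_repetitive_patterns_py_alt text =
      [("repeatedPhrases", pvCanRep (PySem.List.sorted2 (pvL text) Prod.fst Prod.snd)),
       ("maxRepetition", pvCanMx (PySem.List.sorted2 (pvL text) Prod.fst Prod.snd))] := by
  unfold check_repetitive_patterns_py_alt
  simp only [letFun]
  rw [show ((PySem.Str.split₀ text).zip (PySem.List.slice (PySem.Str.split₀ text) (some 1) none)) = pvL text from rfl]
  have hpw := pv_sorted2_pairwise (pvL text)
  cases hS : PySem.List.sorted2 (pvL text) Prod.fst Prod.snd with
  | nil => simp [pvCanRep, pvCanMx]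
  | cons y T =>
    rw [hS] at hpw
    rw [List.foldl_cons, show pvAltStep (none, 0, 0, 0) y = (some y, 1, 0, 0) from by
      simp [pvAltStep]]
    have hmain := pv_main T.length T y 0 0 le_rfl hpw
    rw [Prod.mk.injEq] at hmain
    obtain ⟨hm1, hm2⟩ := hmain
    rw [hm1, hm2, zero_add, max_eq_right (pv_canMx_nonneg _)]

-- ===== VERDICT (by name: the statement is the Claim_ definition above) =====
theorem check_repetitive_patterns_py_spec : Claim_equal_check_repetitive_patterns_py := by
  intro text _
  unfold Spec_check_repetitive_patterns_py
  rw [pv_A_eq, pv_B_eq,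
    pv_canRep_perm (PySem.List.sorted2_perm (pvL text) Prod.fst Prod.snd false),
    pv_canMx_perm (PySem.List.sorted2_perm (pvL text) Prod.fst Prod.snd false)]
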